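-- pv_equiv track=rewrite | github.com/Ayushraj021/Python-learning | three-positive-integer.py | product_of_values
-- ===== SOURCE A (Python) =====
-- def product_of_values(a, b, c):
--     values = [a, b, c]
--
--     # Check for the presence of 7 and its position
--     if 7 in values:
--         index_of_7 = values.index(7)
--         values = values[index_of_7 + 1:]
--
--     # Calculate the product of remaining values
--     if not values:  # If no values left after removing 7 and its left values
--         return -1
--     product = 1
--     for value in values:
--         product *= value
--     return product
-- ===== SOURCE B (Python) =====
-- def product_of_values(a, b, c):
--     if a == 7:
--         return b * c
--     if b == 7:
--         return c
--     if c == 7: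
--         return -1
--     return a * b * c
-- ===== Notes on version B (the rewrite author's own statement) =====
-- stated objective: simpler
-- what changed: Replaces the list build, 'in'/.index scan, slice and multiply loop with direct case analysis on a, b, c in order, returning b*c, c, -1 or a*b*c.
import Mathlib
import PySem

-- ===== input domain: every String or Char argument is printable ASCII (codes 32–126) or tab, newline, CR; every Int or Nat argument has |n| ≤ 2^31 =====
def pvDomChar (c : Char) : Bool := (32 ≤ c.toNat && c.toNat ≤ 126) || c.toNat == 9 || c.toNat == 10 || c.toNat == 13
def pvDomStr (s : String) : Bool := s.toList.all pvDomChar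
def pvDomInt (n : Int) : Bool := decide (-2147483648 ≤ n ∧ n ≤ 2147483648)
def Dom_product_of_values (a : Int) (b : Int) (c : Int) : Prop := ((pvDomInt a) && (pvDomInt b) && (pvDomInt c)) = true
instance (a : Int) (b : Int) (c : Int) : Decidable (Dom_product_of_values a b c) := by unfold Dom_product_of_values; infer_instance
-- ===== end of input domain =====

-- ===== PORT A =====
-- B replaces the list/index/slice/loop with direct case analysis on a, b, c (objective: simpler).
def product_of_values (a : Int) (b : Int) (c : Int) : Int :=
  let values : List Int := [a, b, c]
  let values :=
    if 7 ∈ values then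
      match PySem.List.index? values 7 with
      | some i => PySem.List.slice values (some ((i : Int) + 1)) none
      | none => values
    else values
  if values = [] then -1
  else values.foldl (fun product value => product * value) 1

-- ===== PORT B =====
def product_of_values_alt (a : Int) (b : Int) (c : Int) : Int :=
  if a = 7 then b * c
  else if b = 7 then c
  else if c = 7 then -1
  else a * b * c

-- ===== PRECONDITION & SPEC =====
def Spec_product_of_values (a : Int) (b : Int) (c : Int) (out : Int) : Prop := out = product_of_values_alt a b c
instance (a : Int) (b : Int) (c : Int) (out : Int) : Decidable (Spec_product_of_values a b c out) := by unfold Spec_product_of_values; infer_instance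

-- ===== CLAIM (what is proved, stated in full; the proofs are below) =====
def Claim_equal_product_of_values : Prop := ∀ (a : Int) (b : Int) (c : Int), Dom_product_of_values a b c → Spec_product_of_values a b c (product_of_values a b c)

-- ===== LEMMAS AND PROOFS =====

-- ===== VERDICT (by name: the statement is the Claim_ definition above) =====
theorem product_of_values_spec : Claim_equal_product_of_values := by
  intro a b c _
  unfold Spec_product_of_values product_of_values product_of_values_alt
  by_cases ha : a = 7 <;> by_cases hb : b = 7 <;> by_cases hc : c = 7 <;>
    simp [ha, hb, hc, PySem.List.index?, PySem.List.slice, PySem.List.clampIdx,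
          List.idxOf?, List.findIdx?, List.findIdx?.go, @eq_comm Int 7] <;> ring
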